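-- pv_equiv track=rewrite | github.com/JJavier98/MH | PRACTICAS/P1/src/Practica1.py | get_tags_class
-- ===== SOURCE A (Python) =====
-- def get_tags_class(tags):
-- 	num_element_in_class = {}
-- 	tags_class = []
-- 	for w in tags:
-- 		if w in num_element_in_class:
-- 			num_element_in_class[w] = num_element_in_class[w]+1
-- 		else:
-- 			num_element_in_class[w] = 1
-- 			tags_class.append(w)
--
-- 	return num_element_in_class, tags_class
-- ===== SOURCE B (Python) =====
-- def get_tags_class(tags):
-- 	tags_class = list(dict.fromkeys(tags))
-- 	num_element_in_class = {}
-- 	for w in tags: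
-- 		num_element_in_class[w] = num_element_in_class.get(w, 0) + 1
-- 	return num_element_in_class, tags_class
-- ===== Notes on version B (the rewrite author's own statement) =====
-- stated objective: simpler
-- what changed: Replaces A's single loop that maintains the count dict and the unique-label list together behind a membership branch by two independent passes: dict.fromkeys gives the first-appearance unique list, and a branch-free dict.get counting pass gives the counts.
import Mathlib
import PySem

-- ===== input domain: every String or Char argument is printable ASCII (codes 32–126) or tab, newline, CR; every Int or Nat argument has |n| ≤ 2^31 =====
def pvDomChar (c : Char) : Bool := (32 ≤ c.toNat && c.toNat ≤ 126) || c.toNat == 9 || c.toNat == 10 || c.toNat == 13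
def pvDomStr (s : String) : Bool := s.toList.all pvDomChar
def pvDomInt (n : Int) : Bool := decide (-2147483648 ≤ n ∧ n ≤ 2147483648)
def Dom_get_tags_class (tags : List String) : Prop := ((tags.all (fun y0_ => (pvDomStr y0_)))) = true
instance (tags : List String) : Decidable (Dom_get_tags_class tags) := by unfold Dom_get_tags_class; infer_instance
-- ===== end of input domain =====

-- B computes the two results in two separate passes (an ordered dedup, then a branch-free counting
-- pass) instead of A's single combined loop; proved equal to A on all inputs (A is total).

-- ===== PORT A =====
def get_tags_class (tags : List String) : (List (String × Int)) × List String :=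
  let st := tags.foldl
    (fun (st : PySem.Dict String Int × List String) w =>
      if st.1.contains w then
        (st.1.insert w (st.1.getD w 0 + 1), st.2)
      else
        (st.1.insert w 1, st.2 ++ [w]))
    (PySem.Dict.empty, [])
  (st.1.items, st.2)

-- ===== PORT B =====
def get_tags_class_alt (tags : List String) : (List (String × Int)) × List String :=
  let tags_class := PySem.List.dedup tags
  let num_element_in_class :=
    tags.foldl (fun (d : PySem.Dict String Int) w => d.insert w (d.getD w 0 + 1))
      PySem.Dict.empty
  (num_element_in_class.items, tags_class)

-- ===== PRECONDITION & SPEC =====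
def Spec_get_tags_class (tags : List String) (out : (List (String × Int)) × List String) : Prop := out = get_tags_class_alt tags
instance (tags : List String) (out : (List (String × Int)) × List String) : Decidable (Spec_get_tags_class tags out) := by unfold Spec_get_tags_class; infer_instance

-- ===== CLAIM (what is proved, stated in full; the proofs are below) =====
def Claim_equal_get_tags_class : Prop := ∀ (tags : List String), Dom_get_tags_class tags → Spec_get_tags_class tags (get_tags_class tags)

-- ===== LEMMAS AND PROOFS =====

lemma aFold_eq (l : List String) (d : PySem.Dict String Int) :
    l.foldl
      (fun (st : PySem.Dict String Int × List String) w =>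
        if st.1.contains w then
          (st.1.insert w (st.1.getD w 0 + 1), st.2)
        else
          (st.1.insert w 1, st.2 ++ [w]))
      (d, d.keys) =
    (l.foldl (fun d w => d.insert w (d.getD w 0 + 1)) d,
     (l.foldl (fun (d : PySem.Dict String Int) w => d.insert w (d.getD w 0 + 1)) d).keys) := by
  induction l generalizing d with
  | nil => rfl
  | cons w l ih =>
    simp only [List.foldl_cons]
    by_cases h : d.contains w
    · rw [if_pos h]
      have hk : (d.insert w (d.getD w 0 + 1)).keys = d.keys :=
        PySem.Dict.keys_insert_of_contains d _ h
      rw [← hk]; exact ih _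
    · have hf : d.contains w = false := by simpa using h
      rw [if_neg h]
      have hv : d.insert w (d.getD w 0 + 1) = d.insert w 1 := by
        rw [PySem.Dict.getD_of_not_contains d 0 hf, zero_add]
      have hk : (d.insert w (1 : Int)).keys = d.keys ++ [w] :=
        PySem.Dict.keys_insert_of_not_contains d _ hf
      rw [hv, ← hk]; exact ih _

-- ===== VERDICT (by name: the statement is the Claim_ definition above) =====
theorem get_tags_class_spec : Claim_equal_get_tags_class := by
  intro tags _
  show get_tags_class tags = get_tags_class_alt tags
  unfold get_tags_class get_tags_class_alt
  have h := aFold_eq tags PySem.Dict.empty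
  rw [show (PySem.Dict.empty : PySem.Dict String Int).keys = [] from rfl,
      PySem.Dict.foldl_insert_getD_add_one_eq_counter] at h
  simp only [h, PySem.Dict.foldl_insert_getD_add_one_eq_counter, PySem.Dict.keys_counter,
    PySem.List.dedup_eq_ofList]
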